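-- pv_equiv track=rewrite | github.com/FedericoBarberon/int-programacion | guia8.py | es_comentario
-- ===== SOURCE A (Python) =====
-- def es_comentario(linea: str) -> bool:
--     res: bool = False
--     chars: list[str] = list(linea)
--     es_el_primero = True
--
--     for i in range(len(chars)):
--         if chars[i] == "#" and es_el_primero:
--             res = True
--         elif chars[i] != " ":
--             es_el_primero = False
--
--     return res
-- ===== SOURCE B (Python) =====
-- def es_comentario(linea: str) -> bool:
--     return linea.lstrip(" ").startswith("#")
-- ===== Notes on version B (the rewrite author's own statement) =====
-- stated objective: simpler
-- what changed: Replaces the indexed full scan that maintains a result flag and a 'still at the front' flag with a closed-form strip of leading spaces followed by a startswith('#') test.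
import Mathlib
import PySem

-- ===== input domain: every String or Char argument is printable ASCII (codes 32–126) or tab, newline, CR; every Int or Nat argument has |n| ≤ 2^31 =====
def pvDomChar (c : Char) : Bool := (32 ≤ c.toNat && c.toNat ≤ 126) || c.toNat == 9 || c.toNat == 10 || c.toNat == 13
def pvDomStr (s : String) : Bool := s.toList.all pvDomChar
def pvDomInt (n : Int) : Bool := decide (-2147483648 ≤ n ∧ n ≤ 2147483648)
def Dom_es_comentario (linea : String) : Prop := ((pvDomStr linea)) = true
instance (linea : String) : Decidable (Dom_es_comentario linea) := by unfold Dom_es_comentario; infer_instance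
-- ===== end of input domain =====

-- B replaces A's flag-maintaining full scan by stripping leading spaces and testing startswith("#") (simpler, same cost).

-- ===== PORT A =====
-- the body of A's for-loop: s = (res, es_el_primero)
def pvStep (s : Bool × Bool) (c : Char) : Bool × Bool :=
  if c == '#' && s.2 then (true, s.2)
  else if c != ' ' then (s.1, false)
  else s

def es_comentario (linea : String) : Bool :=
  let chars : List Char := linea.toList
  let st := (PySem.List.pyRange 0 (chars.length : Int) 1).foldl
    (fun s i => pvStep s (PySem.List.pyGetD chars i ' '))   -- chars[i]; i ∈ range(len(chars))
    (false, true)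
  st.1

-- ===== PORT B =====
-- linea.lstrip(" ") strips exactly the leading ' ' characters: ported by hand as dropWhile (· == ' ') (exact).
def es_comentario_alt (linea : String) : Bool :=
  PySem.Chars.startswith (linea.toList.dropWhile (· == ' ')) ['#']

-- ===== PRECONDITION & SPEC =====
def Spec_es_comentario (linea : String) (out : Bool) : Prop := out = es_comentario_alt linea
instance (linea : String) (out : Bool) : Decidable (Spec_es_comentario linea out) := by unfold Spec_es_comentario; infer_instance

-- ===== CLAIM (what is proved, stated in full; the proofs are below) =====
def Claim_equal_es_comentario : Prop := ∀ (linea : String), Dom_es_comentario linea → Spec_es_comentario linea (es_comentario linea)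

-- ===== LEMMAS AND PROOFS =====

-- once the "still at the front" flag is false, the result component never changes
theorem pvStep_false (cs : List Char) (res : Bool) :
    (cs.foldl pvStep (res, false)).1 = res := by
  induction cs generalizing res with
  | nil => rfl
  | cons c cs ih =>
      by_cases h : c = ' ' <;> simp [pvStep, h, ih]

theorem pvStep_true (cs : List Char) (res : Bool) :
    (cs.foldl pvStep (res, true)).1
      = (res || PySem.Chars.startswith (cs.dropWhile (· == ' ')) ['#']) := by
  induction cs generalizing res with
  | nil => simp [PySem.Chars.startswith]
  | cons c cs ih =>
      by_cases hh : c = '#'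
      · subst hh
        simp [pvStep, List.dropWhile, ih, PySem.Chars.startswith, List.isPrefixOf]
      · by_cases hs : c = ' '
        · subst hs
          simp [pvStep, List.dropWhile, ih]
        · have hh1 : (c == '#') = false := beq_eq_false_iff_ne.mpr hh
          have hh2 : ('#' == c) = false := beq_eq_false_iff_ne.mpr (Ne.symm hh)
          have hs' : (c == ' ') = false := beq_eq_false_iff_ne.mpr hs
          simp [pvStep, hh1, hh2, hs, hs', List.dropWhile, pvStep_false,
            List.isPrefixOf, PySem.Chars.startswith]

theorem pv_fold_range_eq (cs : List Char) :
    (PySem.List.pyRange 0 (cs.length : Int) 1).foldl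
      (fun s i => pvStep s (PySem.List.pyGetD cs i ' ')) (false, true)
      = cs.foldl pvStep (false, true) := by
  have h := PySem.List.foldl_pyRange_pyGetD' (xs := cs) (f := pvStep) (d := ' ')
      (init := ((false, true) : Bool × Bool)) (a := 0) (by norm_num)
  simpa using h

-- ===== VERDICT (by name: the statement is the Claim_ definition above) =====
theorem es_comentario_spec : Claim_equal_es_comentario := by
  intro linea _
  show es_comentario linea = es_comentario_alt linea
  simp only [es_comentario, es_comentario_alt]
  rw [pv_fold_range_eq]
  simp [pvStep_true]
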